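-- pv_equiv track=rewrite | github.com/fbarulli/bert | simpler_fine_bert/embedding/masking.py | _get_maskable_boundaries
-- ===== SOURCE A (Python) =====
-- from typing import Tuple, Optional, List, Set, Dict
--
-- def _get_maskable_boundaries(
--
--     word_boundaries: List[Tuple[int, int]],
--     word_ids: List[Optional[int]],
--     max_span_length: Optional[int] = None
-- ) -> List[Tuple[int, int]]:
--     """Get maskable word boundaries excluding special tokens.
--
--     Args:
--         word_boundaries: List of word boundary tuples
--         word_ids: Word IDs from tokenizer
--         max_span_length: Optional maximum span length for span masking
--
--     Returns:
--         List of maskable word boundary tuples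
--     """
--     maskable = []
--
--     for i, (start, end) in enumerate(word_boundaries):
--         # Skip if any token in span is special
--         if any(word_ids[j] is None for j in range(start, end)):
--             continue
--
--         maskable.append((start, end))
--
--     return maskable
-- ===== SOURCE B (Python) =====
-- from typing import Tuple, Optional, List
--
--
-- def _get_maskable_boundaries(
--     word_boundaries: List[Tuple[int, int]],
--     word_ids: List[Optional[int]],
--     max_span_length: Optional[int] = None
-- ) -> List[Tuple[int, int]]:
--     """Get maskable word boundaries excluding special tokens.
--
--     One pass builds a prefix count of None entries; each boundary is then
--     decided by a range query on the in-range part of its span.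
--     """
--     n = len(word_ids)
--     prefix = [0]
--     c = 0
--     for w in word_ids:
--         c += (w is None)
--         prefix.append(c)
--     result = []
--     for start, end in word_boundaries:
--         a = max(start, 0)
--         b = min(end, n)
--         if a >= b or prefix[b] == prefix[a]:
--             result.append((start, end))
--     return result
-- ===== Notes on version B (the rewrite author's own statement) =====
-- stated objective: alternative
-- what changed: Replaced the per-boundary scan of every token in the span by a single prefix-sum of None counts over word_ids, so each boundary is decided by one range query on its in-range part instead of a token-by-token scan.
-- intended difference: On inputs with a non-empty span whose negative start makes A read the tail of word_ids via Python's negative-index wraparound and hit a None there while the span's in-range part has no None, A silently drops that boundary; B keeps it, judging the span by its actual in-range tokens, which is the intended reading of a word boundary. — e.g. on _get_maskable_boundaries([(-1, 1)], [some 0, none], none): A returns [], B returns [(-1, 1)]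
import Mathlib
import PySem

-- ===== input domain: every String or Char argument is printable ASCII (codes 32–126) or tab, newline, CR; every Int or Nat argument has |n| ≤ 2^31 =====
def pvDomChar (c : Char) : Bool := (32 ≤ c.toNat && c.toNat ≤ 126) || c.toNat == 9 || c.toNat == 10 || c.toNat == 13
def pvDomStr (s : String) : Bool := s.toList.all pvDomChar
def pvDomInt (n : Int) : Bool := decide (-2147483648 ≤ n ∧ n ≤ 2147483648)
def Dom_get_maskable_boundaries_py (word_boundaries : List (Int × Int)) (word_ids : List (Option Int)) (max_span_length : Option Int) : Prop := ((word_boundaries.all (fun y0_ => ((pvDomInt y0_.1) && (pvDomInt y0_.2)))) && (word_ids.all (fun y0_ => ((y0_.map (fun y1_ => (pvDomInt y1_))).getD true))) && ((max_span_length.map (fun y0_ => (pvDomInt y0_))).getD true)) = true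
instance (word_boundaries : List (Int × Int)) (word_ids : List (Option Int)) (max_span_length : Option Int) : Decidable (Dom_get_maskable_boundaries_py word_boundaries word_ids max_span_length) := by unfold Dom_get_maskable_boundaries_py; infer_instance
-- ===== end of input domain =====

-- B replaces A's per-boundary token-by-token scan by one prefix-sum of None counts
-- plus a range query per boundary (objective: alternative).

-- ===== PORT A =====
def get_maskable_boundaries_py (word_boundaries : List (Int × Int)) (word_ids : List (Option Int)) (max_span_length : Option Int) : List (Int × Int) :=
  word_boundaries.foldl
    (fun maskable se =>
      if (PySem.List.pyRange se.1 se.2 1).any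
          (fun j => PySem.List.pyGet? word_ids j == some none) then
        maskable
      else
        maskable ++ [se])
    []

-- ===== PORT B =====
def get_maskable_boundaries_py_alt (word_boundaries : List (Int × Int)) (word_ids : List (Option Int)) (max_span_length : Option Int) : List (Int × Int) :=
  let n : Int := (word_ids.length : Int)
  let pc : List Int × Int :=
    word_ids.foldl
      (fun st w =>
        let c := st.2 + (if w = none then 1 else 0)
        (st.1 ++ [c], c))
      ([0], 0)
  word_boundaries.foldl
    (fun result se =>
      let a := max se.1 0
      let b := min se.2 n
      if a ≥ b ∨ PySem.List.pyGetD pc.1 b 0 = PySem.List.pyGetD pc.1 a 0 then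
        result ++ [se]
      else
        result)
    []

-- ===== PRECONDITION & SPEC =====
-- Pre_ excludes exactly the inputs on which A raises IndexError: a non-empty span
-- starting below -len(word_ids), or one running past len(word_ids) with no None at
-- any earlier index of the span (A short-circuits at the first None it scans).
def Pre_get_maskable_boundaries_py (word_boundaries : List (Int × Int)) (word_ids : List (Option Int)) (max_span_length : Option Int) : Prop :=
  ∀ se ∈ word_boundaries, se.1 < se.2 →
    (-(word_ids.length : Int) ≤ se.1 ∧
      (se.2 ≤ (word_ids.length : Int) ∨
        ((PySem.List.pyRange se.1 0 1).any
          (fun j => PySem.List.pyGet? word_ids (j + (word_ids.length : Int)) == some none) = true) ∨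
        ((PySem.List.pyRange (max se.1 0) (word_ids.length : Int) 1).any
          (fun j => PySem.List.pyGet? word_ids j == some none) = true)))
instance (word_boundaries : List (Int × Int)) (word_ids : List (Option Int)) (max_span_length : Option Int) : Decidable (Pre_get_maskable_boundaries_py word_boundaries word_ids max_span_length) := by unfold Pre_get_maskable_boundaries_py; infer_instance

def pvWitness_get_maskable_boundaries_py : (List (Int × Int)) × List (Option Int) × Option Int :=
  ([(0, 1)], [some 5], none)

-- per-span condition used by D_: the span is non-empty, starts negative, its
-- wrapped tail indices hit a None while its in-range part has no None
abbrev pvSpanD (word_ids : List (Option Int)) (se : Int × Int) : Prop :=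
  se.1 < se.2 ∧ se.1 < 0 ∧
  -(word_ids.length : Int) ≤ se.1 ∧
  ((PySem.List.pyRange se.1 (min se.2 0) 1).any
      (fun j => PySem.List.pyGet? word_ids (j + (word_ids.length : Int)) == some none) = true) ∧
  ((PySem.List.pyRange (max se.1 0) (min se.2 (word_ids.length : Int)) 1).any
      (fun j => PySem.List.pyGet? word_ids j == some none) = false)

-- On inputs with a non-empty span whose negative start makes A read the tail of
-- word_ids via Python's negative-index wraparound and hit a None there while the
-- span's in-range part has no None, A silently drops that boundary; B keeps it,
-- judging the span by its actual in-range tokens, which is the intended reading.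
def D_get_maskable_boundaries_py (word_boundaries : List (Int × Int)) (word_ids : List (Option Int)) (max_span_length : Option Int) : Prop :=
  ∃ se ∈ word_boundaries, pvSpanD word_ids se
instance (word_boundaries : List (Int × Int)) (word_ids : List (Option Int)) (max_span_length : Option Int) : Decidable (D_get_maskable_boundaries_py word_boundaries word_ids max_span_length) := by unfold D_get_maskable_boundaries_py; infer_instance

def Spec_get_maskable_boundaries_py (word_boundaries : List (Int × Int)) (word_ids : List (Option Int)) (max_span_length : Option Int) (out : List (Int × Int)) : Prop := ¬ D_get_maskable_boundaries_py word_boundaries word_ids max_span_length → out = get_maskable_boundaries_py_alt word_boundaries word_ids max_span_length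
instance (word_boundaries : List (Int × Int)) (word_ids : List (Option Int)) (max_span_length : Option Int) (out : List (Int × Int)) : Decidable (Spec_get_maskable_boundaries_py word_boundaries word_ids max_span_length out) := by unfold Spec_get_maskable_boundaries_py; infer_instance

def pvDiffWitness_get_maskable_boundaries_py : (List (Int × Int)) × List (Option Int) × Option Int :=
  ([(-1, 1)], [some 0, none], none)
def pvDiffWitnessOut_get_maskable_boundaries_py : (List (Int × Int)) × (List (Int × Int)) :=
  ([], [(-1, 1)])


-- ===== CLAIM (what is proved, stated in full; the proofs are below) =====
def Claim_unchanged_get_maskable_boundaries_py : Prop := ∀ (word_boundaries : List (Int × Int)) (word_ids : List (Option Int)) (max_span_length : Option Int), Dom_get_maskable_boundaries_py word_boundaries word_ids max_span_length → Pre_get_maskable_boundaries_py word_boundaries word_ids max_span_length → Spec_get_maskable_boundaries_py word_boundaries word_ids max_span_length (get_maskable_boundaries_py word_boundaries word_ids max_span_length)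
def Claim_changed_get_maskable_boundaries_py : Prop := Dom_get_maskable_boundaries_py (pvDiffWitness_get_maskable_boundaries_py.1) (pvDiffWitness_get_maskable_boundaries_py.2.1) (pvDiffWitness_get_maskable_boundaries_py.2.2) ∧ Pre_get_maskable_boundaries_py (pvDiffWitness_get_maskable_boundaries_py.1) (pvDiffWitness_get_maskable_boundaries_py.2.1) (pvDiffWitness_get_maskable_boundaries_py.2.2) ∧ D_get_maskable_boundaries_py (pvDiffWitness_get_maskable_boundaries_py.1) (pvDiffWitness_get_maskable_boundaries_py.2.1) (pvDiffWitness_get_maskable_boundaries_py.2.2) ∧ get_maskable_boundaries_py (pvDiffWitness_get_maskable_boundaries_py.1) (pvDiffWitness_get_maskable_boundaries_py.2.1) (pvDiffWitness_get_maskable_boundaries_py.2.2) = pvDiffWitnessOut_get_maskable_boundaries_py.1 ∧ get_maskable_boundaries_py_alt (pvDiffWitness_get_maskable_boundaries_py.1) (pvDiffWitness_get_maskable_boundaries_py.2.1) (pvDiffWitness_get_maskable_boundaries_py.2.2) = pvDiffWitnessOut_get_maskable_boundaries_py.2 ∧ pvDiffWitnessOut_get_maskable_boundaries_py.1 ≠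 pvDiffWitnessOut_get_maskable_boundaries_py.2
def Claim_exact_get_maskable_boundaries_py : Prop := ∀ (word_boundaries : List (Int × Int)) (word_ids : List (Option Int)) (max_span_length : Option Int), Dom_get_maskable_boundaries_py word_boundaries word_ids max_span_length → Pre_get_maskable_boundaries_py word_boundaries word_ids max_span_length → D_get_maskable_boundaries_py word_boundaries word_ids max_span_length → get_maskable_boundaries_py word_boundaries word_ids max_span_length ≠ get_maskable_boundaries_py_alt word_boundaries word_ids max_span_length

-- ===== LEMMAS AND PROOFS =====

-- count of None entries (as an Int) in a list of word ids
def pvCnt (l : List (Option Int)) : Int := (l.countP (fun w => w == none) : Int)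

-- the prefix-count list B's first loop builds
def pvPrefix (wi : List (Option Int)) : List Int :=
  (List.range (wi.length + 1)).map (fun k => pvCnt (wi.take k))

-- "some index j with lo ≤ j < hi holds a None"
def pvHasNone (wi : List (Option Int)) (lo hi : Int) : Prop :=
  ∃ j : Int, lo ≤ j ∧ j < hi ∧ wi[j.toNat]? = some none

theorem pvPc_eq (wi : List (Option Int)) :
    wi.foldl (fun (st : List Int × Int) w =>
        let c := st.2 + (if w = none then 1 else 0)
        (st.1 ++ [c], c)) ([0], 0)
      = (pvPrefix wi, pvCnt wi) := by
  induction wi using List.reverseRecOn with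
  | nil => simp [pvPrefix, pvCnt]
  | append_singleton ws w ih =>
    rw [List.foldl_append, ih]
    simp only [List.foldl_cons, List.foldl_nil]
    have hcnt : pvCnt (ws ++ [w]) = pvCnt ws + (if w = none then 1 else 0) := by
      unfold pvCnt
      rw [List.countP_append]
      cases w <;> simp
    have hpre : pvPrefix (ws ++ [w]) = pvPrefix ws ++ [pvCnt (ws ++ [w])] := by
      unfold pvPrefix
      conv_lhs => rw [show ((ws ++ [w]).length + 1) = (ws.length + 1) + 1 by simp,
        List.range_succ, List.map_append]
      congr 1
      · apply List.map_congr_left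
        intro k hk
        rw [List.take_append_of_le_length
          (Nat.lt_succ_iff.mp (List.mem_range.mp hk))]
      · simp only [List.map_cons, List.map_nil]
        rw [List.take_of_length_le (by simp)]
    rw [Prod.mk.injEq]
    exact ⟨by rw [hpre, hcnt], hcnt.symm⟩

theorem pvPrefix_get (wi : List (Option Int)) (i : Int) (h0 : 0 ≤ i)
    (h1 : i ≤ (wi.length : Int)) :
    PySem.List.pyGetD (pvPrefix wi) i 0 = pvCnt (wi.take i.toNat) := by
  have hlen : (pvPrefix wi).length = wi.length + 1 := by simp [pvPrefix]
  rw [PySem.List.pyGetD_eq_getElem _ _ h0 (by rw [hlen]; push_cast; omega)]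
  unfold pvPrefix
  rw [List.getElem_map, List.getElem_range]

theorem pvCnt_take_iff (wi : List (Option Int)) (a b : Nat) (hab : a ≤ b)
    (hb : b ≤ wi.length) :
    pvCnt (wi.take b) = pvCnt (wi.take a) ↔
      ∀ k : Nat, a ≤ k → k < b → wi[k]? ≠ some none := by
  induction b, hab using Nat.le_induction with
  | base => simp; omega
  | succ b hab ih =>
    have hb' : b < wi.length := by omega
    have hstep : pvCnt (wi.take (b + 1)) =
        pvCnt (wi.take b) + (if wi[b] = none then 1 else 0) := by
      have ht : wi.take (b + 1) = wi.take b ++ [wi[b]] := by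
        rw [List.take_add_one, List.getElem?_eq_getElem hb']; rfl
      rw [ht]
      unfold pvCnt
      rw [List.countP_append]
      cases h : wi[b] <;> simp
    have hmono : pvCnt (wi.take a) ≤ pvCnt (wi.take b) := by
      have h1 : (wi.take b).take a = wi.take a := by
        rw [List.take_take]; congr 1; omega
      have hsub : (wi.take a).Sublist (wi.take b) := h1 ▸ List.take_sublist a (wi.take b)
      unfold pvCnt
      exact_mod_cast List.Sublist.countP_le hsub
    rw [hstep]
    constructor
    · intro h k hk1 hk2
      have hif : (if wi[b] = none then (1:Int) else 0) = 0 := by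
        by_cases hw : wi[b] = none <;> simp [hw] at h ⊢ <;> omega
      have hcnt : pvCnt (wi.take b) = pvCnt (wi.take a) := by omega
      rcases Nat.lt_succ_iff_lt_or_eq.mp hk2 with hlt | heq
      · exact (ih (by omega)).mp hcnt k hk1 hlt
      · subst heq
        rw [List.getElem?_eq_getElem hb']
        intro hc
        simp at hc
        simp [hc] at hif
    · intro h
      have hcnt : pvCnt (wi.take b) = pvCnt (wi.take a) :=
        (ih (by omega)).mpr (fun k hk1 hk2 => h k hk1 (by omega))
      have hbn : wi[b] ≠ none := by
        intro hc
        have := h b (by omega) (by omega)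
        rw [List.getElem?_eq_getElem hb'] at this
        simp [hc] at this
      simp [hbn]
      omega

theorem pvCnt_take_iff' (wi : List (Option Int)) (a b : Int) (h0 : 0 ≤ a)
    (hab : a ≤ b) (hb : b ≤ (wi.length : Int)) :
    pvCnt (wi.take b.toNat) = pvCnt (wi.take a.toNat) ↔ ¬ pvHasNone wi a b := by
  rw [pvCnt_take_iff wi a.toNat b.toNat (by omega) (by omega)]
  unfold pvHasNone
  constructor
  · rintro h ⟨j, hj1, hj2, hj3⟩
    exact h j.toNat (by omega) (by omega) hj3
  · intro h k hk1 hk2 hc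
    exact h ⟨(k : Int), by omega, by omega, by simpa using hc⟩

theorem pvGet_neg (wi : List (Option Int)) (j : Int) (hj : j < 0)
    (hl : -(wi.length : Int) ≤ j) :
    PySem.List.pyGet? wi j = wi[(j + wi.length).toNat]? := by
  have hk : j = -(((-j).toNat : Nat) : Int) := by omega
  rw [hk, PySem.List.pyGet?_neg_natCast _ _ (by omega) (by omega)]
  congr 1
  omega

theorem pvAny_nonneg (wi : List (Option Int)) (lo hi : Int) (h0 : 0 ≤ lo) :
    ((PySem.List.pyRange lo hi 1).any
        (fun j => PySem.List.pyGet? wi j == some none) = true) ↔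
      pvHasNone wi lo hi := by
  rw [List.any_eq_true]
  constructor
  · rintro ⟨j, hj, hb⟩
    rw [PySem.List.mem_pyRange_one] at hj
    rw [PySem.List.pyGet?_of_nonneg _ (by omega)] at hb
    exact ⟨j, hj.1, hj.2, by simpa using hb⟩
  · rintro ⟨j, hj1, hj2, hj3⟩
    refine ⟨j, PySem.List.mem_pyRange_one.mpr ⟨hj1, hj2⟩, ?_⟩
    rw [PySem.List.pyGet?_of_nonneg _ (by omega)]
    simpa using hj3

theorem pvAny_neg (wi : List (Option Int)) (s m : Int) (h1 : -(wi.length : Int) ≤ s)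
    (hm : m ≤ 0) :
    ((PySem.List.pyRange s m 1).any
        (fun j => PySem.List.pyGet? wi j == some none) = true) ↔
      pvHasNone wi (s + wi.length) (m + wi.length) := by
  rw [List.any_eq_true]
  constructor
  · rintro ⟨j, hj, hb⟩
    rw [PySem.List.mem_pyRange_one] at hj
    rw [pvGet_neg wi j (by omega) (by omega)] at hb
    exact ⟨j + wi.length, by omega, by omega, by simpa using hb⟩
  · rintro ⟨j', hj1, hj2, hj3⟩
    refine ⟨j' - wi.length, PySem.List.mem_pyRange_one.mpr ⟨by omega, by omega⟩, ?_⟩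
    rw [pvGet_neg wi _ (by omega) (by omega)]
    have he : j' - (wi.length : Int) + wi.length = j' := by ring
    rw [he]
    simpa using hj3

-- A's per-span test, under the bounds Pre_ guarantees
theorem pvBadA_iff (wi : List (Option Int)) (s e : Int) (hse : s < e)
    (h1 : -(wi.length : Int) ≤ s) (h2 : e ≤ (wi.length : Int)) :
    ((PySem.List.pyRange s e 1).any
        (fun j => PySem.List.pyGet? wi j == some none) = true) ↔
      (pvHasNone wi (s + wi.length) (min e 0 + wi.length) ∨
        pvHasNone wi (max s 0) (min e (wi.length : Int))) := by
  by_cases hs0 : 0 ≤ s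
  · have hmax : max s 0 = s := by omega
    have hmin : min e (wi.length : Int) = e := by omega
    rw [hmax, hmin, pvAny_nonneg wi s e hs0]
    constructor
    · intro h; exact Or.inr h
    · rintro (⟨j, hj1, hj2, _⟩ | h)
      · omega
      · exact h
  · push_neg at hs0
    have hsm : s ≤ min e 0 := by omega
    have hme : min e 0 ≤ e := by omega
    rw [PySem.List.pyRange_one_append s (min e 0) e hsm hme, List.any_append,
      Bool.or_eq_true, pvAny_neg wi s (min e 0) h1 (by omega)]
    by_cases he0 : 0 < e
    · have hm0 : min e 0 = 0 := by omega
      have hmax : max s 0 = 0 := by omega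
      have hmin : min e (wi.length : Int) = e := by omega
      rw [hm0, hmax, hmin, pvAny_nonneg wi 0 e le_rfl]
    · push_neg at he0
      have hm0 : min e 0 = e := by omega
      have hmin : min e (wi.length : Int) = e := by omega
      rw [hm0, hmin]
      constructor
      · rintro (h | h)
        · exact Or.inl h
        · rw [PySem.List.pyRange_one_eq_nil le_rfl] at h
          simp at h
      · rintro (h | ⟨j, hj1, hj2, _⟩)
        · exact Or.inl h
        · omega

-- the two any-expressions inside pvSpanD, as pvHasNone
theorem pvTail_iff (wi : List (Option Int)) (s e : Int) (h1 : -(wi.length : Int) ≤ s) :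
    ((PySem.List.pyRange s (min e 0) 1).any
        (fun j => PySem.List.pyGet? wi (j + (wi.length : Int)) == some none) = true) ↔
      pvHasNone wi (s + wi.length) (min e 0 + wi.length) := by
  rw [List.any_eq_true]
  constructor
  · rintro ⟨j, hj, hb⟩
    rw [PySem.List.mem_pyRange_one] at hj
    rw [PySem.List.pyGet?_of_nonneg _ (by omega)] at hb
    exact ⟨j + wi.length, by omega, by omega, by simpa using hb⟩
  · rintro ⟨j', hj1, hj2, hj3⟩
    refine ⟨j' - wi.length, PySem.List.mem_pyRange_one.mpr ⟨by omega, by omega⟩, ?_⟩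
    rw [PySem.List.pyGet?_of_nonneg _ (by omega)]
    have he : j' - (wi.length : Int) + wi.length = j' := by ring
    rw [he]
    simpa using hj3

theorem pvClamp_iff (wi : List (Option Int)) (s e : Int) :
    ((PySem.List.pyRange (max s 0) (min e (wi.length : Int)) 1).any
        (fun j => PySem.List.pyGet? wi j == some none) = true) ↔
      pvHasNone wi (max s 0) (min e (wi.length : Int)) := by
  exact pvAny_nonneg wi _ _ (le_max_right _ _)

-- B's per-span test
theorem pvKeepB_iff (wi : List (Option Int)) (s e : Int) :
    (max s 0 ≥ min e (wi.length : Int) ∨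
      PySem.List.pyGetD (pvPrefix wi) (min e (wi.length : Int)) 0 =
        PySem.List.pyGetD (pvPrefix wi) (max s 0) 0) ↔
      (min e (wi.length : Int) ≤ max s 0 ∨
        ¬ pvHasNone wi (max s 0) (min e (wi.length : Int))) := by
  by_cases hab : min e (wi.length : Int) ≤ max s 0
  · simp [hab, ge_iff_le]
  · push_neg at hab
    have h0a : (0:Int) ≤ max s 0 := le_max_right _ _
    rw [pvPrefix_get wi _ (by omega) (by omega),
      pvPrefix_get wi _ h0a (by omega),
      pvCnt_take_iff' wi _ _ h0a (by omega) (by omega)]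

-- the two ports as filters over word_boundaries
theorem pvA_filter (wb : List (Int × Int)) (wi : List (Option Int)) (msl : Option Int) :
    get_maskable_boundaries_py wb wi msl =
      wb.filter (fun se => !(PySem.List.pyRange se.1 se.2 1).any
        (fun j => PySem.List.pyGet? wi j == some none)) := by
  unfold get_maskable_boundaries_py
  have hf : (fun (maskable : List (Int × Int)) (se : Int × Int) =>
      if (PySem.List.pyRange se.1 se.2 1).any
          (fun j => PySem.List.pyGet? wi j == some none) then maskable
      else maskable ++ [se])
      = (fun (maskable : List (Int × Int)) (se : Int × Int) =>
        if (!(PySem.List.pyRange se.1 se.2 1).any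
            (fun j => PySem.List.pyGet? wi j == some none)) = true
        then maskable ++ [se] else maskable) := by
    funext acc x
    cases hc : (PySem.List.pyRange x.1 x.2 1).any
        (fun j => PySem.List.pyGet? wi j == some none) <;> simp [hc]
  rw [hf, PySem.List.foldl_append_if_eq_filter]
  simp

theorem pvB_filter (wb : List (Int × Int)) (wi : List (Option Int)) (msl : Option Int) :
    get_maskable_boundaries_py_alt wb wi msl =
      wb.filter (fun se => decide
        (max se.1 0 ≥ min se.2 (wi.length : Int) ∨
          PySem.List.pyGetD (pvPrefix wi) (min se.2 (wi.length : Int)) 0 =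
            PySem.List.pyGetD (pvPrefix wi) (max se.1 0) 0)) := by
  simp only [get_maskable_boundaries_py_alt]
  rw [pvPc_eq]
  rw [PySem.List.foldl_append_ite_eq_filter]
  simp

theorem pvFilter_length_lt {α : Type} (l : List α) (p q : α → Bool)
    (hmono : ∀ x ∈ l, p x = true → q x = true) (x : α) (hx : x ∈ l)
    (hpx : p x = false) (hqx : q x = true) :
    (l.filter p).length < (l.filter q).length := by
  induction l with
  | nil => cases hx
  | cons y ys ih =>
    have hmono' : ∀ z ∈ ys, p z = true → q z = true :=
      fun z hz => hmono z (List.mem_cons_of_mem _ hz)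
    rcases List.mem_cons.mp hx with rfl | hx'
    · have hle : (ys.filter p).length ≤ (ys.filter q).length := by
        rw [← List.countP_eq_length_filter, ← List.countP_eq_length_filter]
        exact List.countP_mono_left hmono'
      simp [List.filter_cons, hpx, hqx]
      omega
    · have hlt := ih hmono' hx'
      cases hpy : p y
      · cases hqy : q y <;> simp [List.filter_cons, hpy, hqy] <;> omega
      · have hqy : q y = true := hmono y (List.mem_cons_self ..) hpy
        simp [List.filter_cons, hpy, hqy]
        omega

-- ===== VERDICT (by name: the statement is the Claim_ definition above) =====
-- per-span agreement of the two filter predicates, outside D_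
theorem pvPred_eq (wi : List (Option Int)) (s e : Int)
    (hpre : s < e → -(wi.length : Int) ≤ s ∧
      (e ≤ (wi.length : Int) ∨
        ((PySem.List.pyRange s 0 1).any
          (fun j => PySem.List.pyGet? wi (j + (wi.length : Int)) == some none) = true) ∨
        ((PySem.List.pyRange (max s 0) (wi.length : Int) 1).any
          (fun j => PySem.List.pyGet? wi j == some none) = true)))
    (hnd : ¬ pvSpanD wi (s, e)) :
    (!(PySem.List.pyRange s e 1).any
        (fun j => PySem.List.pyGet? wi j == some none)) =
      decide (max s 0 ≥ min e (wi.length : Int) ∨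
        PySem.List.pyGetD (pvPrefix wi) (min e (wi.length : Int)) 0 =
          PySem.List.pyGetD (pvPrefix wi) (max s 0) 0) := by
  by_cases hse : s < e
  · obtain ⟨h1, hrest⟩ := hpre hse
    by_cases h2 : e ≤ (wi.length : Int)
    swap
    · -- the span runs past the right end; Pre_ guarantees A's scan hits a None first
      push_neg at h2
      have hscan := hrest.resolve_left (by omega)
      have hC : pvHasNone wi (max s 0) (min e (wi.length : Int)) := by
        rcases hscan with ht | hc
        · by_contra hnc
          have hmin : min e 0 = 0 := by omega
          refine hnd ⟨hse, ?_, h1, ?_,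
            Bool.eq_false_iff.mpr (fun h => hnc ((pvClamp_iff wi s e).mp h))⟩
          · obtain ⟨j, hj, _⟩ := List.any_eq_true.mp ht
            rw [PySem.List.mem_pyRange_one] at hj
            omega
          · dsimp only
            rw [hmin]
            exact ht
        · obtain ⟨j, hj, hb⟩ := List.any_eq_true.mp hc
          rw [PySem.List.mem_pyRange_one] at hj
          rw [PySem.List.pyGet?_of_nonneg _ (by omega)] at hb
          exact ⟨j, hj.1, by omega, by simpa using hb⟩
      have hbad : (PySem.List.pyRange s e 1).any
          (fun j => PySem.List.pyGet? wi j == some none) = true := by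
        obtain ⟨j, hj1, hj2, hj3⟩ := hC
        refine List.any_eq_true.mpr ⟨j, PySem.List.mem_pyRange_one.mpr ⟨by omega, by omega⟩, ?_⟩
        rw [PySem.List.pyGet?_of_nonneg _ (by omega)]
        simpa using hj3
      have hkeep : ¬ (max s 0 ≥ min e (wi.length : Int) ∨
          PySem.List.pyGetD (pvPrefix wi) (min e (wi.length : Int)) 0 =
            PySem.List.pyGetD (pvPrefix wi) (max s 0) 0) := by
        intro h
        rcases (pvKeepB_iff wi s e).mp h with h | h
        · obtain ⟨j, hj1, hj2, _⟩ := hC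
          omega
        · exact h hC
      rw [hbad]
      exact (decide_eq_false hkeep).symm
    have key : ((PySem.List.pyRange s e 1).any
        (fun j => PySem.List.pyGet? wi j == some none) = true) ↔
        ¬ (max s 0 ≥ min e (wi.length : Int) ∨
          PySem.List.pyGetD (pvPrefix wi) (min e (wi.length : Int)) 0 =
            PySem.List.pyGetD (pvPrefix wi) (max s 0) 0) := by
      rw [pvBadA_iff wi s e hse h1 h2, pvKeepB_iff wi s e]
      by_cases hs0 : 0 ≤ s
      · constructor
        · rintro (⟨j, hj1, hj2, _⟩ | hc)
          · omega
          · rintro (hba | hnc)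
            · omega
            · exact hnc hc
        · intro h
          refine Or.inr ?_
          by_contra hnc
          exact h (Or.inr hnc)
      · push_neg at hs0
        have hTC : ¬ (pvHasNone wi (s + wi.length) (min e 0 + wi.length) ∧
            ¬ pvHasNone wi (max s 0) (min e (wi.length : Int))) := by
          rintro ⟨hT, hC⟩
          exact hnd ⟨hse, hs0, h1, (pvTail_iff wi s e h1).mpr hT,
            Bool.eq_false_iff.mpr (fun h => hC ((pvClamp_iff wi s e).mp h))⟩
        by_cases he0 : 0 < e
        · constructor
          · rintro (hT | hC)
            · have hC : pvHasNone wi (max s 0) (min e (wi.length : Int)) := by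
                by_contra hnc; exact hTC ⟨hT, hnc⟩
              rintro (hba | hnc)
              · omega
              · exact hnc hC
            · rintro (hba | hnc)
              · omega
              · exact hnc hC
          · intro h
            refine Or.inr ?_
            by_contra hnc
            exact h (Or.inr hnc)
        · push_neg at he0
          have hCfalse : ¬ pvHasNone wi (max s 0) (min e (wi.length : Int)) := by
            rintro ⟨j, hj1, hj2, _⟩
            omega
          constructor
          · rintro (hT | hC)
            · exact absurd ⟨hT, hCfalse⟩ hTC
            · exact absurd hC hCfalse
          · intro h
            exact (h (Or.inl (by omega))).elim
    by_cases hkeep : (max s 0 ≥ min e (wi.length : Int) ∨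
        PySem.List.pyGetD (pvPrefix wi) (min e (wi.length : Int)) 0 =
          PySem.List.pyGetD (pvPrefix wi) (max s 0) 0)
    · have hb : (PySem.List.pyRange s e 1).any
          (fun j => PySem.List.pyGet? wi j == some none) = false := by
        cases h : (PySem.List.pyRange s e 1).any
            (fun j => PySem.List.pyGet? wi j == some none)
        · rfl
        · exact absurd hkeep (key.mp h)
      rw [hb]
      exact (decide_eq_true hkeep).symm
    · rw [key.mpr hkeep]
      exact (decide_eq_false hkeep).symm
  · have hb : (PySem.List.pyRange s e 1).any
        (fun j => PySem.List.pyGet? wi j == some none) = false := by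
      rw [PySem.List.pyRange_one_eq_nil (by omega)]
      rfl
    have hkeep : max s 0 ≥ min e (wi.length : Int) := by omega
    rw [hb]
    exact (decide_eq_true (Or.inl hkeep)).symm

theorem get_maskable_boundaries_py_spec : Claim_unchanged_get_maskable_boundaries_py := by
  intro wb wi msl hdom hpre hnd
  rw [pvA_filter, pvB_filter]
  apply List.filter_congr
  intro se hse
  have hnd' : ¬ pvSpanD wi se := fun h => hnd ⟨se, hse, h⟩
  obtain ⟨s, e⟩ := se
  exact pvPred_eq wi s e (hpre (s, e) hse) hnd'

theorem get_maskable_boundaries_py_changed : Claim_changed_get_maskable_boundaries_py := by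
  unfold Claim_changed_get_maskable_boundaries_py; decide

theorem get_maskable_boundaries_py_tight : Claim_exact_get_maskable_boundaries_py := by
  intro wb wi msl hdom hpre hd hEq
  obtain ⟨se, hse, hsd⟩ := hd
  obtain ⟨s, e⟩ := se
  obtain ⟨hse', hs0, h1, hT, hC⟩ := hsd
  dsimp only at hse' hs0 h1 hT hC
  have hT' : pvHasNone wi (s + wi.length) (min e 0 + wi.length) :=
    (pvTail_iff wi s e h1).mp hT
  have hC' : ¬ pvHasNone wi (max s 0) (min e (wi.length : Int)) :=
    fun h => by rw [(pvClamp_iff wi s e).mpr h] at hC; cases hC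
  rw [pvA_filter, pvB_filter] at hEq
  have hmono : ∀ x ∈ wb,
      (!(PySem.List.pyRange x.1 x.2 1).any
        (fun j => PySem.List.pyGet? wi j == some none)) = true →
      (decide (max x.1 0 ≥ min x.2 (wi.length : Int) ∨
        PySem.List.pyGetD (pvPrefix wi) (min x.2 (wi.length : Int)) 0 =
          PySem.List.pyGetD (pvPrefix wi) (max x.1 0) 0)) = true := by
    rintro ⟨s', e'⟩ hx hpx
    simp only [Bool.not_eq_true'] at hpx
    simp only [decide_eq_true_eq]
    by_cases hse2 : s' < e'
    · obtain ⟨h1', hrest'⟩ := hpre _ hx hse2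
      by_cases h2' : e' ≤ (wi.length : Int)
      · rw [pvKeepB_iff wi s' e']
        refine Or.inr ?_
        intro hc
        have : (PySem.List.pyRange s' e' 1).any
            (fun j => PySem.List.pyGet? wi j == some none) = true :=
          (pvBadA_iff wi s' e' hse2 h1' h2').mpr (Or.inr hc)
        rw [this] at hpx
        cases hpx
      · -- A's scan hits a None (Pre_), so the left side cannot have kept this span
        exfalso
        push_neg at h2'
        have hscan := hrest'.resolve_left (by omega)
        have hbad : (PySem.List.pyRange s' e' 1).any
            (fun j => PySem.List.pyGet? wi j == some none) = true := by
          rcases hscan with ht | hc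
          · obtain ⟨j, hj, hb⟩ := List.any_eq_true.mp ht
            rw [PySem.List.mem_pyRange_one] at hj
            rw [PySem.List.pyGet?_of_nonneg _ (by omega)] at hb
            refine List.any_eq_true.mpr
              ⟨j, PySem.List.mem_pyRange_one.mpr ⟨hj.1, by omega⟩, ?_⟩
            rw [pvGet_neg wi j (by omega) (by omega)]
            exact hb
          · obtain ⟨j, hj, hb⟩ := List.any_eq_true.mp hc
            rw [PySem.List.mem_pyRange_one] at hj
            exact List.any_eq_true.mpr
              ⟨j, PySem.List.mem_pyRange_one.mpr ⟨by omega, by omega⟩, hb⟩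
        rw [hpx] at hbad
        exact Bool.false_ne_true hbad
    · exact Or.inl (by omega)
  have hpA : (!(PySem.List.pyRange s e 1).any
      (fun j => PySem.List.pyGet? wi j == some none)) = false := by
    obtain ⟨j', hj1, hj2, hj3⟩ := hT'
    have hbad : (PySem.List.pyRange s e 1).any
        (fun j => PySem.List.pyGet? wi j == some none) = true := by
      refine List.any_eq_true.mpr
        ⟨j' - wi.length, PySem.List.mem_pyRange_one.mpr ⟨by omega, by omega⟩, ?_⟩
      rw [pvGet_neg wi _ (by omega) (by omega)]
      have he : j' - (wi.length : Int) + wi.length = j' := by ring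
      rw [he]
      simpa using hj3
    rw [hbad]
    rfl
  have hpB : (decide (max s 0 ≥ min e (wi.length : Int) ∨
      PySem.List.pyGetD (pvPrefix wi) (min e (wi.length : Int)) 0 =
        PySem.List.pyGetD (pvPrefix wi) (max s 0) 0)) = true := by
    simp only [decide_eq_true_eq]
    rw [pvKeepB_iff wi s e]
    exact Or.inr hC'
  have hlt := pvFilter_length_lt wb _ _ hmono (s, e) hse hpA hpB
  rw [hEq] at hlt
  exact lt_irrefl _ hlt
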